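-- pv_equiv track=rewrite | github.com/sakshi09-create/TE-B-Mini-Project-2A-2025-26 | GroupNo.13_ZenSpace.AI/Zen-Space_AI/backend/ai/design_generation.py | generate_fallback_designs
-- ===== SOURCE A (Python) =====
-- from typing import List, Dict
--
-- def generate_fallback_designs(num_images: int) -> List[str]:
--     """Generate fallback placeholder designs when AI model fails"""
--     fallback_designs = []
--
--     # Use placeholder service with interior design themes
--     base_urls = [
--         "https://images.unsplash.com/photo-1586023492125-27b2c045efd7?w=512&h=512&fit=crop",  # Living room
--         "https://images.unsplash.com/photo-1567538096630-e0c55bd6374c?w=512&h=512&fit=crop",  # Bedroom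
--         "https://images.unsplash.com/photo-1556909114-f6e7ad7d3136?w=512&h=512&fit=crop",  # Kitchen
--         "https://images.unsplash.com/photo-1582037928769-181f2644ecb7?w=512&h=512&fit=crop",  # Dining room
--     ]
--
--     for i in range(num_images):
--         url = base_urls[i % len(base_urls)]
--         fallback_designs.append(url)
--
--     return fallback_designs
-- ===== SOURCE B (Python) =====
-- def generate_fallback_designs(num_images):
--     """Generate fallback placeholder designs when AI model fails"""
--     base_urls = [
--         "https://images.unsplash.com/photo-1586023492125-27b2c045efd7?w=512&h=512&fit=crop",  # Living room
--         "https://images.unsplash.com/photo-1567538096630-e0c55bd6374c?w=512&h=512&fit=crop",  # Bedroom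
--         "https://images.unsplash.com/photo-1556909114-f6e7ad7d3136?w=512&h=512&fit=crop",  # Kitchen
--         "https://images.unsplash.com/photo-1582037928769-181f2644ecb7?w=512&h=512&fit=crop",  # Dining room
--     ]
--     reps = num_images // len(base_urls) + 1
--     return (base_urls * reps)[:num_images]
-- ===== Notes on version B (the rewrite author's own statement) =====
-- stated objective: simpler
-- what changed: Replaces the per-element loop with modulo indexing by whole-list replication (base_urls * reps) truncated by a slice to num_images.
import Mathlib
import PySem

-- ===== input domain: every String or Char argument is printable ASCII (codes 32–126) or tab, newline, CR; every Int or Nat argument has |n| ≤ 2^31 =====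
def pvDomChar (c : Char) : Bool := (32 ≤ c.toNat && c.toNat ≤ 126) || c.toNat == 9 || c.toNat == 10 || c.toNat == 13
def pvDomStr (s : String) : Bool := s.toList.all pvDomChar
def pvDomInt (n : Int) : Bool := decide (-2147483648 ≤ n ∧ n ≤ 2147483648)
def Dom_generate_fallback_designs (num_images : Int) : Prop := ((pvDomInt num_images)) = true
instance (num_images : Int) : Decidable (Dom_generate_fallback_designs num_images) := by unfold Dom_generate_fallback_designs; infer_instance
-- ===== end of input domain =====

-- B replaces A's per-element loop with modulo indexing by whole-list replication plus a
-- truncating slice (simpler decomposition; same cost).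


-- ===== PORT A =====
-- A's base_urls literal
def pvBaseUrlsA : List String :=
  [ "https://images.unsplash.com/photo-1586023492125-27b2c045efd7?w=512&h=512&fit=crop"
  , "https://images.unsplash.com/photo-1567538096630-e0c55bd6374c?w=512&h=512&fit=crop"
  , "https://images.unsplash.com/photo-1556909114-f6e7ad7d3136?w=512&h=512&fit=crop"
  , "https://images.unsplash.com/photo-1582037928769-181f2644ecb7?w=512&h=512&fit=crop" ]

-- for i in range(num_images): fallback_designs.append(base_urls[i % len(base_urls)])
-- base_urls[i % len] is always in range (i ≥ 0, modulus 4 > 0), so pyGetD's default is never used.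
def generate_fallback_designs (num_images : Int) : List String :=
  (PySem.List.pyRange 0 num_images 1).foldl
    (fun fallback_designs i =>
      fallback_designs ++ [PySem.List.pyGetD pvBaseUrlsA (PySem.Int.mod i (pvBaseUrlsA.length : Int)) ""])
    []

-- ===== PORT B =====
-- B's base_urls literal
def pvBaseUrlsB : List String :=
  [ "https://images.unsplash.com/photo-1586023492125-27b2c045efd7?w=512&h=512&fit=crop"
  , "https://images.unsplash.com/photo-1567538096630-e0c55bd6374c?w=512&h=512&fit=crop"
  , "https://images.unsplash.com/photo-1556909114-f6e7ad7d3136?w=512&h=512&fit=crop"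
  , "https://images.unsplash.com/photo-1582037928769-181f2644ecb7?w=512&h=512&fit=crop" ]

-- Python list * int: negative multiplier gives [] — Int.toNat clamps exactly so.
def pvListMul {α : Type} (xs : List α) (r : Int) : List α :=
  (List.replicate r.toNat xs).flatten

-- reps = num_images // len(base_urls) + 1; return (base_urls * reps)[:num_images]
def generate_fallback_designs_alt (num_images : Int) : List String :=
  let reps := PySem.Int.floordiv num_images (pvBaseUrlsB.length : Int) + 1
  PySem.List.slice (pvListMul pvBaseUrlsB reps) none (some num_images)

-- ===== PRECONDITION & SPEC =====
def Spec_generate_fallback_designs (num_images : Int) (out : List String) : Prop := out = generate_fallback_designs_alt num_images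
instance (num_images : Int) (out : List String) : Decidable (Spec_generate_fallback_designs num_images out) := by unfold Spec_generate_fallback_designs; infer_instance

-- ===== CLAIM (what is proved, stated in full; the proofs are below) =====
def Claim_equal_generate_fallback_designs : Prop := ∀ (num_images : Int), Dom_generate_fallback_designs num_images → Spec_generate_fallback_designs num_images (generate_fallback_designs num_images)

-- ===== LEMMAS AND PROOFS =====

-- element i of r copies of xs, laid end to end, is xs[i % len xs]
lemma getElem?_flatten_replicate {α : Type} (xs : List α) (r i : Nat)
    (hi : i < r * xs.length) :
    (List.replicate r xs).flatten[i]? = xs[i % xs.length]? := by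
  induction r generalizing i with
  | zero => omega
  | succ r ih =>
    have hlen : 0 < xs.length := by
      by_contra h
      simp [Nat.eq_zero_of_not_pos h] at hi
    rw [List.replicate_succ, List.flatten_cons]
    by_cases h : i < xs.length
    · rw [List.getElem?_append_left h, Nat.mod_eq_of_lt h]
    · have hj : i - xs.length < r * xs.length := by
        have h2 : i < r * xs.length + xs.length := by
          calc i < (r + 1) * xs.length := hi
            _ = r * xs.length + xs.length := by ring
        omega
      rw [List.getElem?_append_right (by omega)]
      rw [ih _ hj]
      congr 1
      rw [← Nat.mod_eq_sub_mod (by omega)]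

lemma flatten_replicate_length {α : Type} (xs : List α) (r : Nat) :
    (List.replicate r xs).flatten.length = r * xs.length := by
  induction r with
  | zero => simp
  | succ r ih => simp [List.replicate_succ, ih, Nat.succ_mul]; ring

-- the positive case, over Nat
lemma pos_case (m : Nat) :
    (List.range m).map (fun k => pvBaseUrlsA.getD (k % 4) "")
      = (List.replicate (m / 4 + 1) pvBaseUrlsB).flatten.take m := by
  have hlen : pvBaseUrlsB.length = 4 := by decide
  have hbound : m < (m / 4 + 1) * 4 := by
    have h1 := Nat.div_add_mod m 4
    have h3 : (m / 4 + 1) * 4 = 4 * (m / 4) + 4 := by ring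
    omega
  apply List.ext_getElem?
  intro i
  by_cases hi : i < m
  · have hlenf : (List.replicate (m / 4 + 1) pvBaseUrlsB).flatten.length = (m / 4 + 1) * 4 := by
      rw [flatten_replicate_length, hlen]
    rw [List.getElem?_take_of_lt hi,
        List.getElem?_map, List.getElem?_range hi]
    rw [getElem?_flatten_replicate pvBaseUrlsB (m / 4 + 1) i (by rw [hlen]; omega)]
    rw [hlen]
    have h4 : i % 4 < 4 := Nat.mod_lt _ (by norm_num)
    have : pvBaseUrlsB[i % 4]? = some (pvBaseUrlsA.getD (i % 4) "") := by
      interval_cases h : (i % 4) <;> decide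
    simp [this]
  · rw [List.getElem?_eq_none, List.getElem?_eq_none]
    · simp; omega
    · simp; omega

-- ===== VERDICT (by name: the statement is the Claim_ definition above) =====
theorem generate_fallback_designs_spec : Claim_equal_generate_fallback_designs := by
  intro n _
  unfold Spec_generate_fallback_designs generate_fallback_designs generate_fallback_designs_alt
  by_cases hn : n ≤ 0
  · -- empty loop vs empty/zero-truncated replication
    rw [PySem.List.pyRange_one_eq_nil hn]
    simp only [List.foldl_nil]
    rcases lt_or_eq_of_le hn with hlt | heq
    · -- n < 0: reps ≤ 0, list multiplication yields []
      have hreps : (PySem.Int.floordiv n (pvBaseUrlsB.length : Int) + 1).toNat = 0 := by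
        have h4 : pvBaseUrlsB.length = 4 := by decide
        have hcast4 : ((4 : Nat) : Int) = (4 : Int) := by norm_num
        rw [h4, hcast4]
        have h1 := PySem.Int.floordiv_mul_add_mod n 4
        have h2 : 0 ≤ PySem.Int.mod n 4 := PySem.Int.mod_nonneg n (by norm_num)
        have h3 : PySem.Int.mod n 4 < 4 := PySem.Int.mod_lt n (by norm_num)
        omega
      simp [pvListMul, hreps, PySem.List.slice]
    · -- n = 0: slice [:0] of the base list
      subst heq
      decide
  · -- n > 0
    replace hn : 0 < n := by omega
    obtain ⟨m, rfl⟩ : ∃ m : Nat, n = (m : Int) := ⟨n.toNat, (Int.toNat_of_nonneg (le_of_lt hn)).symm⟩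
    have h4 : pvBaseUrlsB.length = 4 := by decide
    rw [PySem.List.pyRange_one]
    rw [PySem.List.foldl_append_singleton_eq_map]
    have hfd : PySem.Int.floordiv (m : Int) (pvBaseUrlsB.length : Int) = ((m / 4 : Nat) : Int) := by
      rw [h4]; exact_mod_cast PySem.Int.floordiv_natCast m 4
    rw [hfd]
    have hcast : ((m / 4 : Nat) : Int) + 1 = ((m / 4 + 1 : Nat) : Int) := by push_cast; ring
    rw [hcast]
    rw [PySem.List.slice_to_natCast]
    unfold pvListMul
    rw [Int.toNat_natCast]
    rw [← pos_case m]
    simp only [List.nil_append, List.map_map]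
    have hsub : ((m : Int) - 0).toNat = m := by omega
    rw [hsub]
    congr 1
    funext k
    have hmod : PySem.Int.mod (0 + (k : Int)) (pvBaseUrlsA.length : Int) = ((k % 4 : Nat) : Int) := by
      have hA : pvBaseUrlsA.length = 4 := by decide
      rw [hA]
      simp
    rw [Function.comp_apply, hmod, PySem.List.pyGetD_natCast]
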